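-- pv_equiv track=rewrite | github.com/brantmerrell/codility | source/7-stacks-and-queues/2/stone_wall.py | stone_wall
-- ===== SOURCE A (Python) =====
-- def stone_wall(arr_h):
--     """Cover "Manhattan skyline" using the minimum number of rectangles."""
--     # define N as length of arr_h
--     len_n = len(arr_h)
--     # start block count at length of arr_h
--     blocks = len(arr_h)
--     # iterate through arr_h to compare blocks
--     for ndx_n in range(len_n):
--         # create a lookback variable to crawl backwards from current loop location
--         lookback = ndx_n
--         # only crawl backwards while height is high enough to share stones
--         while (arr_h[ndx_n] <= arr_h[lookback]) & (lookback > 0):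
--             lookback -= 1
--             # if a shared height is reached,
--             if arr_h[lookback] == arr_h[ndx_n]:
--                 # subtract from block count
--                 blocks -= 1
--                 # and stop while loop
--                 lookback = 0
--     # return the block count
--     return blocks
-- ===== SOURCE B (Python) =====
-- def stone_wall(arr_h):
--     """Cover "Manhattan skyline" using the minimum number of rectangles."""
--     # single left-to-right pass with a stack of currently "open" rectangle
--     # heights: pop heights taller than the current one; a new rectangle is
--     # needed unless the exposed top equals the current height.
--     blocks = 0
--     stack = []
--     for h in arr_h:
--         while stack and stack[-1] > h:
--             stack.pop()
--         if not stack or stack[-1] < h: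
--             stack.append(h)
--             blocks += 1
--     return blocks
-- ===== Notes on version B (the rewrite author's own statement) =====
-- stated objective: faster
-- what changed: Replaced A's per-element backward crawl over the whole prefix with a single left-to-right pass maintaining a monotone stack of open rectangle heights (pop taller, count unless top equals current), so the inner scan disappears.
import Mathlib
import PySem

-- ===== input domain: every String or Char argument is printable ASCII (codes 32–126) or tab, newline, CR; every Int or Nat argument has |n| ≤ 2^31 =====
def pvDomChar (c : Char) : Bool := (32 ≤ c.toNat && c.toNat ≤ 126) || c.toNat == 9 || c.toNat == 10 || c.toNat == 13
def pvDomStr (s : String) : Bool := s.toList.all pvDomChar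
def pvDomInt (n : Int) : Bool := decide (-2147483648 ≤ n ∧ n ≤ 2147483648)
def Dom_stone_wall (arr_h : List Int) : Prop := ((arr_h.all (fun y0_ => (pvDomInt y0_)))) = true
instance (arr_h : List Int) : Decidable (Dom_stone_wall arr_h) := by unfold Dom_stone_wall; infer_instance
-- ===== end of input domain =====

-- B replaces A's quadratic backward crawl by a one-pass monotone stack (objective: faster, asymptotic).

-- ===== PORT A =====
-- inner while loop of A: crawl backwards from `lookback`; indices are always in range
-- in A's execution, so arr_h[...] is ported as pyGetD with default 0 (never used).
def stoneWallInnerA (arr_h : List Int) (h blocks : Int) (lookback : Int) : Int :=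
  if c : h ≤ PySem.List.pyGetD arr_h lookback 0 ∧ lookback > 0 then
    -- lookback -= 1
    if PySem.List.pyGetD arr_h (lookback - 1) 0 = h then blocks - 1  -- blocks -= 1; lookback = 0 stops the loop
    else stoneWallInnerA arr_h h blocks (lookback - 1)
  else blocks
termination_by lookback.toNat
decreasing_by omega

def stone_wall (arr_h : List Int) : Int :=
  let len_n : Int := arr_h.length
  -- for ndx_n in range(len_n): blocks = inner-loop(blocks, ndx_n); starting blocks = len(arr_h)
  (PySem.List.pyRange 0 len_n 1).foldl
    (fun blocks ndx_n => stoneWallInnerA arr_h (PySem.List.pyGetD arr_h ndx_n 0) blocks ndx_n)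
    len_n

-- ===== PORT B =====
-- `while stack and stack[-1] > h: stack.pop()`; the stack's top is the list head.
def stoneWallPop (h : Int) : List Int → List Int
  | [] => []
  | t :: rest => if h < t then stoneWallPop h rest else t :: rest

def stoneWallStepB (st : Int × List Int) (h : Int) : Int × List Int :=
  let s := stoneWallPop h st.2
  match s with
  | [] => (st.1 + 1, [h])                                -- empty stack: push, count
  | t :: _ => if t < h then (st.1 + 1, h :: s) else (st.1, s)  -- top < h: push, count; top == h: share

def stone_wall_alt (arr_h : List Int) : Int :=
  (arr_h.foldl stoneWallStepB (0, [])).1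

-- ===== PRECONDITION & SPEC =====
def Spec_stone_wall (arr_h : List Int) (out : Int) : Prop := out = stone_wall_alt arr_h
instance (arr_h : List Int) (out : Int) : Decidable (Spec_stone_wall arr_h out) := by unfold Spec_stone_wall; infer_instance

-- ===== CLAIM (what is proved, stated in full; the proofs are below) =====
def Claim_equal_stone_wall : Prop := ∀ (arr_h : List Int), Dom_stone_wall arr_h → Spec_stone_wall arr_h (stone_wall arr_h)

-- ===== LEMMAS AND PROOFS =====

-- first element ≤ h of a list (A's backward crawl scans the reversed prefix for this)
def firstLE (h : Int) : List Int → Option Int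
  | [] => none
  | x :: r => if x ≤ h then some x else firstLE h r

-- 1 iff the crawl from the end of `rp` merges the new block of height h
def mergeInd (h : Int) (rp : List Int) : Int := if firstLE h rp = some h then 1 else 0

-- total number of merges of A, scanning left to right with reversed prefix rp
def sumMerge : List Int → List Int → Int
  | [], _ => 0
  | x :: rest, rp => mergeInd x rp + sumMerge rest (x :: rp)

theorem pop_pop (h x : Int) (hx : h ≤ x) : ∀ s, stoneWallPop h (stoneWallPop x s) = stoneWallPop h s := by
  intro s
  induction s with
  | nil => rfl
  | cons t rest ih =>
    by_cases hxt : x < t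
    · have : h < t := lt_of_le_of_lt hx hxt
      simp [stoneWallPop, hxt, this, ih]
    · simp [stoneWallPop, hxt]

theorem pop_head_le (h : Int) : ∀ s t l, stoneWallPop h s = t :: l → t ≤ h := by
  intro s
  induction s with
  | nil => intro t l hsl; simp [stoneWallPop] at hsl
  | cons a rest ih =>
    intro t l hsl
    by_cases hat : h < a
    · simp [stoneWallPop, hat] at hsl; exact ih _ _ hsl
    · simp [stoneWallPop, hat] at hsl; omega

-- A's inner loop computes the merge indicator over the reversed prefix.
theorem innerA_eq (arr : List Int) : ∀ (j : Nat) (_ : j < arr.length) (h b : Int),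
    stoneWallInnerA arr h b (j : Int) =
      if h ≤ arr[j] then b - mergeInd h ((arr.take j).reverse) else b := by
  intro j
  induction j with
  | zero =>
    intro hj h b
    rw [stoneWallInnerA]
    simp [mergeInd, firstLE]
  | succ k ih =>
    intro hj h b
    have hk : k < arr.length := by omega
    rw [stoneWallInnerA]
    have hget : PySem.List.pyGetD arr ((k+1 : Nat) : Int) 0 = arr[k+1] := by
      rw [PySem.List.pyGetD_natCast, List.getD_eq_getElem arr 0 hj]
    have hsub : ((k+1 : Nat) : Int) - 1 = (k : Int) := by push_cast; ring
    have hgetk : PySem.List.pyGetD arr (((k+1 : Nat) : Int) - 1) 0 = arr[k] := by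
      rw [hsub, PySem.List.pyGetD_natCast, List.getD_eq_getElem arr 0 hk]
    have htake : (arr.take (k+1)).reverse = arr[k] :: (arr.take k).reverse := by
      rw [List.take_add_one]
      simp [hk]
    by_cases hc : h ≤ arr[k+1]
    · have hpos : ((k+1 : Nat) : Int) > 0 := by positivity
      rw [dif_pos ⟨by rw [hget]; exact hc, hpos⟩]
      by_cases heq : arr[k] = h
      · rw [if_pos (by rw [hgetk]; exact heq)]
        simp [hc, htake, mergeInd, firstLE, heq]
      · rw [if_neg (by rw [hgetk]; exact heq), hsub, ih hk h b]
        by_cases hle : h ≤ arr[k]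
        · have : ¬ arr[k] ≤ h := by omega
          simp [hc, hle, htake, mergeInd, firstLE, this]
        · have : arr[k] ≤ h := by omega
          simp [hc, hle, htake, mergeInd, firstLE, this, heq]
    · rw [dif_neg (by rw [hget]; omega)]
      rw [if_neg hc]

-- A's outer loop from index j, with blocks b.
theorem outerA_eq (arr : List Int) : ∀ (d j : Nat), arr.length - j = d → j ≤ arr.length → ∀ (b : Int),
    (PySem.List.pyRange (j : Int) (arr.length : Int) 1).foldl
      (fun blocks ndx => stoneWallInnerA arr (PySem.List.pyGetD arr ndx 0) blocks ndx) b
    = b - sumMerge (arr.drop j) ((arr.take j).reverse) := by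
  intro d
  induction d with
  | zero =>
    intro j hd hj b
    have hjl : j = arr.length := by omega
    subst hjl
    rw [PySem.List.pyRange_one_eq_nil (by omega)]
    simp [sumMerge]
  | succ n ih =>
    intro j hd hj b
    have hjl : j < arr.length := by omega
    rw [PySem.List.pyRange_one_cons (by exact_mod_cast hjl)]
    simp only [List.foldl_cons]
    have hget : PySem.List.pyGetD arr (j : Int) 0 = arr[j] := by
      rw [PySem.List.pyGetD_natCast, List.getD_eq_getElem arr 0 hjl]
    have hcast : ((j : Int) + 1) = ((j+1 : Nat) : Int) := by push_cast; ring
    rw [hget, innerA_eq arr j hjl, if_pos le_rfl, hcast,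
        ih (j+1) (by omega) (by omega)]
    have hdrop : arr.drop j = arr[j] :: arr.drop (j+1) := List.drop_eq_getElem_cons hjl
    have htake : (arr.take (j+1)).reverse = arr[j] :: (arr.take j).reverse := by
      rw [List.take_add_one]; simp [hjl]
    rw [hdrop, htake]
    simp [sumMerge]
    ring

-- invariant linking B's stack to the reversed prefix A crawls over
def InvStack (s rp : List Int) : Prop := ∀ h, (stoneWallPop h s).head? = firstLE h rp

theorem invStack_step (s rp : List Int) (h : Int) (inv : InvStack s rp) :
    InvStack (stoneWallStepB (0, s) h).2 (h :: rp) := by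
  intro h'
  have hfl : firstLE h' (h :: rp) = if h ≤ h' then some h else firstLE h' rp := rfl
  by_cases hle : h ≤ h'
  · -- the new top is h (pushed, or already equal): pop stops immediately
    have hnlt : ¬ h' < h := by omega
    rcases hs : stoneWallPop h s with _ | ⟨t, l⟩
    · simp [stoneWallStepB, hs, stoneWallPop, hnlt, hfl, hle]
    · by_cases htl : t < h
      · simp [stoneWallStepB, hs, htl, stoneWallPop, hnlt, hfl, hle]
      · have ht : t = h := by have := pop_head_le h s t l hs; omega
        subst ht
        simp [stoneWallStepB, hs, stoneWallPop, hnlt, hfl, hle]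
  · -- h' < h: everything sitting at/above height h is popped again
    have hh' : h' ≤ h := by omega
    have key : stoneWallPop h' (stoneWallPop h s) = stoneWallPop h' s := pop_pop h' h hh' s
    have hgoal : firstLE h' (h :: rp) = (stoneWallPop h' s).head? := by
      rw [hfl, if_neg hle, ← inv h']
    rcases hs : stoneWallPop h s with _ | ⟨t, l⟩
    · rw [hs] at key
      simp [stoneWallStepB, stoneWallPop, show h' < h by omega, hgoal, ← key, hs]
    · rw [hs] at key
      by_cases htl : t < h
      · simp [stoneWallStepB, hs, htl, stoneWallPop, show h' < h by omega, hgoal, ← key]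
      · simp [stoneWallStepB, hs, htl, hgoal, ← key]

theorem stepB_count (s : List Int) (b h : Int) :
    (stoneWallStepB (b, s) h).1 = b + 1 - (if (stoneWallPop h s).head? = some h then 1 else 0) ∧
    (stoneWallStepB (b, s) h).2 = (stoneWallStepB (0, s) h).2 := by
  rcases hs : stoneWallPop h s with _ | ⟨t, l⟩
  · simp [stoneWallStepB, hs]
  · by_cases htl : t < h
    · have : ¬ t = h := by omega
      simp [stoneWallStepB, hs, htl, this]
    · have : t = h := by have := pop_head_le h s t l hs; omega
      subst this
      simp [stoneWallStepB, hs]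

theorem foldB_eq : ∀ (rest s rp : List Int) (b : Int), InvStack s rp →
    (rest.foldl stoneWallStepB (b, s)).1 = b + (rest.length : Int) - sumMerge rest rp := by
  intro rest
  induction rest with
  | nil => intro s rp b _; simp [sumMerge]
  | cons h tl ih =>
    intro s rp b inv
    simp only [List.foldl_cons]
    have hc := stepB_count s b h
    have hstep : stoneWallStepB (b, s) h =
        ((stoneWallStepB (b, s) h).1, (stoneWallStepB (0, s) h).2) := by
      rw [← hc.2]
    rw [hstep, ih _ (h :: rp) _ (invStack_step s rp h inv), hc.1, inv h]
    simp only [sumMerge, mergeInd, List.length_cons]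
    by_cases hm : firstLE h rp = some h <;> simp [hm] <;> ring

-- closed forms of the two ports
theorem stone_wall_closed (arr : List Int) :
    stone_wall arr = (arr.length : Int) - sumMerge arr [] := by
  unfold stone_wall
  have := outerA_eq arr arr.length 0 (by omega) (by omega) (arr.length : Int)
  simpa using this

theorem stone_wall_alt_closed (arr : List Int) :
    stone_wall_alt arr = (arr.length : Int) - sumMerge arr [] := by
  unfold stone_wall_alt
  have inv0 : InvStack [] [] := by intro h; rfl
  rw [foldB_eq arr [] [] 0 inv0]
  ring

-- ===== VERDICT (by name: the statement is the Claim_ definition above) =====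
theorem stone_wall_spec : Claim_equal_stone_wall := by
  intro arr _
  unfold Spec_stone_wall
  rw [stone_wall_closed, stone_wall_alt_closed]
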